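-- pv_equiv track=rewrite | github.com/mikana30/Threat_Intel_Tools | recon/modules/base.py | _dedupe
-- ===== SOURCE A (Python) =====
-- from typing import Iterable, List, Optional
--
-- def _dedupe(domains: Iterable[str], target: str) -> List[str]:
--     normalized = set()
--     for line in domains:
--         candidate = line.strip().lower()
--         if not candidate or target not in candidate:
--             continue
--         normalized.add(candidate)
--     return sorted(normalized)
-- ===== SOURCE B (Python) =====
-- def _dedupe(domains, target):
--     cands = []
--     for line in domains:
--         candidate = line.strip().lower()
--         if candidate and target in candidate:
--             cands.append(candidate)
--     cands.sort()
--     out = []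
--     prev = None
--     for candidate in cands:
--         if candidate != prev:
--             out.append(candidate)
--             prev = candidate
--     return out
-- ===== Notes on version B (the rewrite author's own statement) =====
-- stated objective: alternative
-- what changed: Replaces the hash-set accumulation with a plain list of passing candidates (duplicates kept), then sorts it and removes duplicates in a single adjacency scan comparing each element with the previously emitted one.
import Mathlib
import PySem

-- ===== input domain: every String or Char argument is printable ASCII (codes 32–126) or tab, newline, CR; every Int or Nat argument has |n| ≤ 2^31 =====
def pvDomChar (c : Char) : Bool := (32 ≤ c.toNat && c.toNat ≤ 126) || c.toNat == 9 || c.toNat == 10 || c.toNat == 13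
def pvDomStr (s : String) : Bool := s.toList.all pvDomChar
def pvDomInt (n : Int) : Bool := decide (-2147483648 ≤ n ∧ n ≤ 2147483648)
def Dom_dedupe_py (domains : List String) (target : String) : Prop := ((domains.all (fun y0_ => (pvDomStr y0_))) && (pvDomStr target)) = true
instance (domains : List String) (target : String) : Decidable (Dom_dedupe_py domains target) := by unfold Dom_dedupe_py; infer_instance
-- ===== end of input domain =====

-- B replaces A's hash-set dedup with collect-with-duplicates, sort, then a single adjacent-dedup pass (objective: alternative decomposition).

-- ===== PORT A =====
def dedupe_py (domains : List String) (target : String) : List String :=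
  let normalized := domains.foldl (fun normalized line =>
    let candidate := PySem.Str.lower (PySem.Str.strip line)
    if candidate == "" || !(PySem.Str.isIn target candidate) then normalized
    else PySem.Set.add normalized candidate) PySem.Set.empty
  PySem.List.sorted normalized (fun x => x) false

-- ===== PORT B =====
-- B's second loop ('prev' starts as None; emit when candidate != prev)
def pvAdjDedup : Option String → List String → List String
  | _, [] => []
  | prev, c :: rest => if some c = prev then pvAdjDedup prev rest else c :: pvAdjDedup (some c) rest

def dedupe_py_alt (domains : List String) (target : String) : List String :=
  let cands := domains.foldl (fun cands line =>
    let candidate := PySem.Str.lower (PySem.Str.strip line)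
    if candidate != "" && PySem.Str.isIn target candidate then cands ++ [candidate] else cands) []
  pvAdjDedup none (PySem.List.sorted cands (fun x => x) false)

-- ===== PRECONDITION & SPEC =====
def Spec_dedupe_py (domains : List String) (target : String) (out : List String) : Prop := out = dedupe_py_alt domains target
instance (domains : List String) (target : String) (out : List String) : Decidable (Spec_dedupe_py domains target out) := by unfold Spec_dedupe_py; infer_instance

-- ===== CLAIM (what is proved, stated in full; the proofs are below) =====
def Claim_equal_dedupe_py : Prop := ∀ (domains : List String) (target : String), Dom_dedupe_py domains target → Spec_dedupe_py domains target (dedupe_py domains target)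

-- ===== LEMMAS AND PROOFS =====

def pvCands (target : String) (l : List String) : List String :=
  (l.map (fun line => PySem.Str.lower (PySem.Str.strip line))).filter
    (fun c => c != "" && PySem.Str.isIn target c)

lemma pvGuard (x b : Bool) : (x || !b) = !(!x && b) := by cases x <;> cases b <;> rfl

lemma pvFoldA_eq (target : String) : ∀ (l : List String) (s : List String),
    l.foldl (fun normalized line =>
      let candidate := PySem.Str.lower (PySem.Str.strip line)
      if candidate == "" || !(PySem.Str.isIn target candidate) then normalized
      else PySem.Set.add normalized candidate) s
    = (pvCands target l).foldl PySem.Set.add s := by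
  intro l
  induction l with
  | nil => intro s; simp [pvCands]
  | cons a t ih =>
    intro s
    simp only [List.foldl, pvCands, List.map, List.filter, pvGuard, bne]
    cases hne : (!(PySem.Str.lower (PySem.Str.strip a) == "") &&
        PySem.Str.isIn target (PySem.Str.lower (PySem.Str.strip a))) <;>
      simpa [hne, pvCands, bne] using ih _

lemma pvFoldB_eq (target : String) : ∀ (l : List String) (acc : List String),
    l.foldl (fun cands line =>
      let candidate := PySem.Str.lower (PySem.Str.strip line)
      if candidate != "" && PySem.Str.isIn target candidate then cands ++ [candidate] else cands) acc
    = acc ++ pvCands target l := by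
  intro l
  induction l with
  | nil => intro acc; simp [pvCands]
  | cons a t ih =>
    intro acc
    rw [List.foldl_cons]
    simp only [pvCands, List.map_cons, List.filter_cons]
    cases hne : (PySem.Str.lower (PySem.Str.strip a) != "" &&
        PySem.Str.isIn target (PySem.Str.lower (PySem.Str.strip a)))
    · simp only [Bool.false_eq_true, reduceIte]
      exact ih acc
    · simp only [reduceIte]
      rw [ih (acc ++ [PySem.Str.lower (PySem.Str.strip a)])]
      simp [pvCands]

lemma pvAdjDedup_cons_eq (c : String) (rest : List String) :
    pvAdjDedup (some c) (c :: rest) = pvAdjDedup (some c) rest := by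
  simp [pvAdjDedup]

lemma pvAdjDedup_cons_ne (prev : Option String) (c : String) (rest : List String)
    (h : some c ≠ prev) : pvAdjDedup prev (c :: rest) = c :: pvAdjDedup (some c) rest := by
  simp [pvAdjDedup, h]

lemma pvMem_adjDedup : ∀ (l : List String), l.Pairwise (· ≤ ·) →
    (∀ x, x ∈ pvAdjDedup none l ↔ x ∈ l) ∧
    (∀ p, (∀ x ∈ l, p ≤ x) → ∀ x, x ∈ pvAdjDedup (some p) l ↔ (x ∈ l ∧ x ≠ p)) := by
  intro l
  induction l with
  | nil => intro _; constructor <;> simp [pvAdjDedup]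
  | cons c rest ih =>
    intro hpw
    have hc : ∀ x ∈ rest, c ≤ x := (List.pairwise_cons.mp hpw).1
    have ih' := ih (List.pairwise_cons.mp hpw).2
    constructor
    · intro x
      rw [pvAdjDedup_cons_ne none c rest (by simp), List.mem_cons, List.mem_cons,
        (ih'.2 c hc) x]
      constructor
      · rintro (h | ⟨h, _⟩) <;> simp [h]
      · rintro (h | h)
        · exact Or.inl h
        · by_cases hx : x = c
          · exact Or.inl hx
          · exact Or.inr ⟨h, hx⟩
    · intro p hp x
      by_cases hcp : c = p
      · subst hcp
        rw [pvAdjDedup_cons_eq, (ih'.2 c hc) x, List.mem_cons]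
        constructor
        · rintro ⟨h, hne⟩; exact ⟨Or.inr h, hne⟩
        · rintro ⟨h | h, hne⟩
          · exact absurd h hne
          · exact ⟨h, hne⟩
      · rw [pvAdjDedup_cons_ne (some p) c rest (by simp [hcp]), List.mem_cons,
          List.mem_cons, (ih'.2 c hc) x]
        constructor
        · rintro (h | ⟨h, hne⟩)
          · exact ⟨Or.inl h, h ▸ hcp⟩
          · refine ⟨Or.inr h, ?_⟩
            intro hxp
            exact hcp (le_antisymm (hxp ▸ hc x h) (hp c List.mem_cons_self))
        · rintro ⟨h | h, hne⟩
          · exact Or.inl h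
          · by_cases hx : x = c
            · exact Or.inl hx
            · exact Or.inr ⟨h, hx⟩

lemma pvPairwise_adjDedup : ∀ (l : List String), l.Pairwise (· ≤ ·) →
    (pvAdjDedup none l).Pairwise (· < ·) ∧
    (∀ p, (∀ x ∈ l, p ≤ x) → (pvAdjDedup (some p) l).Pairwise (· < ·)) := by
  intro l
  induction l with
  | nil => intro _; constructor <;> simp [pvAdjDedup]
  | cons c rest ih =>
    intro hpw
    have hc : ∀ x ∈ rest, c ≤ x := (List.pairwise_cons.mp hpw).1
    have hrest := (List.pairwise_cons.mp hpw).2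
    have htail : (pvAdjDedup (some c) rest).Pairwise (· < ·) := (ih hrest).2 c hc
    have hhead : ∀ x ∈ pvAdjDedup (some c) rest, c < x := by
      intro x hx
      have := ((pvMem_adjDedup rest hrest).2 c hc x).mp hx
      exact lt_of_le_of_ne (hc x this.1) (Ne.symm this.2)
    constructor
    · rw [pvAdjDedup_cons_ne none c rest (by simp)]
      exact List.pairwise_cons.mpr ⟨hhead, htail⟩
    · intro p hp
      by_cases hcp : c = p
      · subst hcp
        rw [pvAdjDedup_cons_eq]
        exact htail
      · rw [pvAdjDedup_cons_ne (some p) c rest (by simp [hcp])]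
        exact List.pairwise_cons.mpr ⟨hhead, htail⟩

lemma pvSorted_ofList_eq (xs : List String) :
    PySem.List.sorted (PySem.Set.ofList xs) (fun x => x) false
      = pvAdjDedup none (PySem.List.sorted xs (fun x => x) false) := by
  set s := PySem.List.sorted xs (fun x => x) false with hs
  have hpw : s.Pairwise (· ≤ ·) := PySem.List.sorted_pairwise xs (fun x => x)
  have hmem : ∀ x, x ∈ pvAdjDedup none s ↔ x ∈ s := (pvMem_adjDedup s hpw).1
  have hlt : (pvAdjDedup none s).Pairwise (· < ·) := (pvPairwise_adjDedup s hpw).1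
  have hnd : (pvAdjDedup none s).Nodup := hlt.imp ne_of_lt
  have hperm : (pvAdjDedup none s).Perm (PySem.Set.ofList xs) := by
    rw [List.perm_ext_iff_of_nodup hnd (PySem.Set.nodup_ofList xs)]
    intro a
    rw [hmem a, hs, PySem.List.mem_sorted, PySem.Set.mem_ofList]
  exact PySem.List.sorted_eq_of_perm_of_pairwise_lt (PySem.Set.ofList xs)
    (pvAdjDedup none s) (fun x => x) hperm hlt

-- ===== VERDICT (by name: the statement is the Claim_ definition above) =====
theorem dedupe_py_spec : Claim_equal_dedupe_py := by
  intro domains target _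
  unfold Spec_dedupe_py dedupe_py dedupe_py_alt
  dsimp only
  rw [pvFoldA_eq, pvFoldB_eq, List.nil_append,
    show (PySem.Set.empty : List String) = [] from rfl, ← PySem.Set.ofList_eq_foldl,
    pvSorted_ofList_eq]
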